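-- pv_equiv track=rewrite | github.com/Jarot-Fierro/Kardex2.1 | personas/management/commands/actualizar_datos_pacientes.py | normalizar_rut
-- ===== SOURCE A (Python) =====
-- def normalizar_rut(rut):
--     if not rut:
--         return None
--
--     # Quitar cualquier carácter que no sea número o K
--     rut = "".join(c for c in str(rut) if c.isdigit() or c.upper() == "K").upper()
--
--     if len(rut) < 2:
--         return rut
--
--     cuerpo = rut[:-1]
--     dv = rut[-1]
--
--     # Formatear cuerpo con puntos
--     cuerpo_con_puntos = ""
--     for i, char in enumerate(reversed(cuerpo)):
--         if i > 0 and i % 3 == 0: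
--             cuerpo_con_puntos = "." + cuerpo_con_puntos
--         cuerpo_con_puntos = char + cuerpo_con_puntos
--
--     return f"{cuerpo_con_puntos}-{dv}"
-- ===== SOURCE B (Python) =====
-- def normalizar_rut(rut):
--     if not rut:
--         return None
--
--     # Quitar cualquier carácter que no sea número o K
--     rut = "".join(c for c in str(rut) if c.isdigit() or c.upper() == "K").upper()
--
--     if len(rut) < 2:
--         return rut
--
--     cuerpo = rut[:-1]
--     dv = rut[-1]
--
--     # Agrupar el cuerpo en bloques de 3 desde la derecha y unir con puntos
--     parts = []
--     while len(cuerpo) > 3: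
--         parts.insert(0, cuerpo[-3:])
--         cuerpo = cuerpo[:-3]
--     parts.insert(0, cuerpo)
--
--     return ".".join(parts) + "-" + dv
-- ===== Notes on version B (the rewrite author's own statement) =====
-- stated objective: alternative
-- what changed: Replaces the per-character reversed scan with a modulo-indexed dot insertion by splitting the body into 3-digit chunks from the right and joining the chunk list with dot separators.
import Mathlib
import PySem

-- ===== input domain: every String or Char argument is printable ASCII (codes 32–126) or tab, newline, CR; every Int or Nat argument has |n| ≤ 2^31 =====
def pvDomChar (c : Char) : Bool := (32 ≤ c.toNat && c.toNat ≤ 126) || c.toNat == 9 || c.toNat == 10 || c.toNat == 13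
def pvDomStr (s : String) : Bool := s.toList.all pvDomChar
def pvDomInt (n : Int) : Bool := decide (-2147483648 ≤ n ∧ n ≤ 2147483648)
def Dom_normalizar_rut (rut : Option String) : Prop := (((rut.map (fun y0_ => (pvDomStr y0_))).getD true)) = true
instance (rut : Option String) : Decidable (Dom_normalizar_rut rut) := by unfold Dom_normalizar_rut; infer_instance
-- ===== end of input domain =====

-- B formats the RUT body by chunking it into 3-digit groups from the right and joining with dots,
-- instead of A's reversed per-character scan with a modulo-indexed dot insertion (alternative decomposition).

-- ===== PORT A =====
-- the for-loop over enumerate(reversed(cuerpo)) as its obvious structural recursion with the index counter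
def pvFmtA (i : Int) (rev : List Char) (acc : List Char) : List Char :=
  match rev with
  | [] => acc
  | c :: rest => pvFmtA (i + 1) rest (c :: (if 0 < i ∧ i % 3 = 0 then '.' :: acc else acc))

def normalizar_rut (rut : Option String) : Option String :=
  match rut with
  | none => none                    -- `if not rut` (None is falsy)
  | some s =>
    if s.toList = [] then none      -- `if not rut` ('' is falsy)
    else
      let cleaned := PySem.Chars.upper
        (s.toList.filter (fun c => PySem.Chars.isdigit c || PySem.Chars.upperChar c == 'K'))
      if cleaned.length < 2 then some (String.ofList cleaned)
      else
        let cuerpo := cleaned.dropLast            -- rut[:-1]  (slice_to_neg_one)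
        let dv := cleaned.getLastD ' '            -- rut[-1]; exact: cleaned has length ≥ 2 here
        some (String.ofList (pvFmtA 0 cuerpo.reverse [] ++ ['-', dv]))

-- ===== PORT B =====
-- the while-loop peeling 3-digit chunks off the right end, building the list of groups
def pvChunks (cs : List Char) : List (List Char) :=
  if 3 < cs.length then
    pvChunks (cs.take (cs.length - 3)) ++ [cs.drop (cs.length - 3)]
  else [cs]
  termination_by cs.length
  decreasing_by simp_all; omega

def normalizar_rut_alt (rut : Option String) : Option String :=
  match rut with
  | none => none                    -- `if not rut`
  | some s =>
    if s.toList = [] then none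
    else
      let cleaned := PySem.Chars.upper
        (s.toList.filter (fun c => PySem.Chars.isdigit c || PySem.Chars.upperChar c == 'K'))
      if cleaned.length < 2 then some (String.ofList cleaned)
      else
        let cuerpo := cleaned.dropLast            -- rut[:-1]
        let dv := cleaned.getLastD ' '            -- rut[-1]; exact: cleaned has length ≥ 2 here
        some (String.ofList (PySem.Chars.join ['.'] (pvChunks cuerpo) ++ ['-', dv]))

-- ===== PRECONDITION & SPEC =====
def Spec_normalizar_rut (rut : Option String) (out : Option String) : Prop := out = normalizar_rut_alt rut
instance (rut : Option String) (out : Option String) : Decidable (Spec_normalizar_rut rut out) := by unfold Spec_normalizar_rut; infer_instance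

-- ===== CLAIM (what is proved, stated in full; the proofs are below) =====
def Claim_equal_normalizar_rut : Prop := ∀ (rut : Option String), Dom_normalizar_rut rut → Spec_normalizar_rut rut (normalizar_rut rut)

-- ===== LEMMAS AND PROOFS =====

theorem pvFmtA_append (xs : List Char) (ys : List Char) (i : Int) (acc : List Char) :
    pvFmtA i (xs ++ ys) acc = pvFmtA (i + xs.length) ys (pvFmtA i xs acc) := by
  induction xs generalizing i acc with
  | nil => simp [pvFmtA]
  | cons c rest ih =>
      simp only [List.cons_append, pvFmtA, ih, List.length_cons]
      congr 1
      push_cast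
      ring

theorem pvChunks_step (t : List Char) (h : 3 < t.length) :
    pvChunks t = pvChunks (t.take (t.length - 3)) ++ [t.drop (t.length - 3)] := by
  conv_lhs => rw [pvChunks]
  rw [if_pos h]

theorem pvChunks_ne_nil (cs : List Char) : pvChunks cs ≠ [] := by
  unfold pvChunks
  split <;> simp

theorem join_append_singleton (sep : List Char) (ps : List (List Char)) (d : List Char)
    (h : ps ≠ []) :
    PySem.Chars.join sep (ps ++ [d]) = PySem.Chars.join sep ps ++ sep ++ d := by
  induction ps with
  | nil => simp at h
  | cons p rest ih =>
      cases rest with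
      | nil => simp [PySem.Chars.join_cons_cons, PySem.Chars.join_singleton]
      | cons q rest' =>
          have h2 := ih (by simp)
          simp only [List.cons_append, PySem.Chars.join_cons_cons] at h2 ⊢
          rw [h2]; simp

-- main invariant: A's reversed scan from index 3*m equals B's chunk-join,
-- with the pending dot already accounted for when m > 0
theorem pvFmtA_eq_join (n : ℕ) :
    ∀ (t : List Char) (acc : List Char) (m : ℕ), t.length = n → (m = 0 ∨ t ≠ []) →
      pvFmtA (3 * (m : Int)) t.reverse acc =
        PySem.Chars.join ['.'] (pvChunks t) ++ (if m = 0 then acc else '.' :: acc) := by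
  induction n using Nat.strong_induction_on with
  | _ n ih =>
    intro t acc m hlen hm
    by_cases hle : t.length ≤ 3
    · -- short body: no recursion in pvChunks, at most one dot (at the first scanned char)
      have hch : pvChunks t = [t] := by
        unfold pvChunks; rw [if_neg (by omega)]
      rw [hch, PySem.Chars.join_singleton]
      match t, hle with
      | [], _ =>
          rcases hm with h0 | h0
          · simp [pvFmtA, h0]
          · simp at h0
      | [a], _ =>
          rcases Nat.eq_zero_or_pos m with h0 | h0
          · subst h0; norm_num [pvFmtA]
          · rw [if_neg (show ¬ m = 0 by omega)]
            simp only [List.reverse_cons, List.reverse_nil, List.nil_append, pvFmtA]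
            rw [if_pos (show 0 < 3 * (m : Int) ∧ 3 * (m : Int) % 3 = 0 by omega)]
            rfl
      | [a, b], _ =>
          rcases Nat.eq_zero_or_pos m with h0 | h0
          · subst h0; norm_num [pvFmtA]
          · rw [if_neg (show ¬ m = 0 by omega)]
            simp only [List.reverse_cons, List.reverse_nil, List.nil_append,
              List.cons_append, pvFmtA]
            rw [if_neg (show ¬ (0 < 3 * (m : Int) + 1 ∧ (3 * (m : Int) + 1) % 3 = 0) by omega),
              if_pos (show 0 < 3 * (m : Int) ∧ 3 * (m : Int) % 3 = 0 by omega)]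
      | [a, b, c], _ =>
          rcases Nat.eq_zero_or_pos m with h0 | h0
          · subst h0; norm_num [pvFmtA]
          · rw [if_neg (show ¬ m = 0 by omega)]
            simp only [List.reverse_cons, List.reverse_nil, List.nil_append,
              List.cons_append, pvFmtA]
            rw [if_neg (show ¬ (0 < 3 * (m : Int) + 1 + 1 ∧ (3 * (m : Int) + 1 + 1) % 3 = 0) by omega),
              if_neg (show ¬ (0 < 3 * (m : Int) + 1 ∧ (3 * (m : Int) + 1) % 3 = 0) by omega),
              if_pos (show 0 < 3 * (m : Int) ∧ 3 * (m : Int) % 3 = 0 by omega)]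
    · -- long body: peel the last 3 characters as one chunk and recurse
      have hlt : 3 < t.length := by omega
      have hdlen : (t.drop (t.length - 3)).length = 3 := by
        simp; omega
      obtain ⟨a, b, c, hd⟩ := List.length_eq_three.mp hdlen
      have ht'len : (t.take (t.length - 3)).length = t.length - 3 := by
        simp
      have hch : pvChunks t = pvChunks (t.take (t.length - 3)) ++ [[a, b, c]] := by
        rw [pvChunks_step t hlt, hd]
      have hrev : t.reverse = [c, b, a] ++ (t.take (t.length - 3)).reverse := by
        conv_lhs => rw [← List.take_append_drop (t.length - 3) t]
        rw [hd]
        simp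
      rw [hrev, pvFmtA_append]
      -- process the three chunk characters
      have hstep : pvFmtA (3 * (m : Int)) [c, b, a] acc =
          [a, b, c] ++ (if m = 0 then acc else '.' :: acc) := by
        rcases Nat.eq_zero_or_pos m with h0 | h0
        · subst h0; norm_num [pvFmtA]
        · rw [if_neg (show ¬ m = 0 by omega)]
          simp only [pvFmtA]
          rw [if_neg (show ¬ (0 < 3 * (m : Int) + 1 + 1 ∧ (3 * (m : Int) + 1 + 1) % 3 = 0) by omega),
            if_neg (show ¬ (0 < 3 * (m : Int) + 1 ∧ (3 * (m : Int) + 1) % 3 = 0) by omega),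
            if_pos (show 0 < 3 * (m : Int) ∧ 3 * (m : Int) % 3 = 0 by omega)]
          rfl
      rw [hstep]
      have harg : (3 * (m : Int)) + ([c, b, a] : List Char).length = 3 * ((m + 1 : ℕ) : Int) := by
        simp; ring
      rw [harg]
      have hne : t.take (t.length - 3) ≠ [] := by
        intro h
        rw [h] at ht'len
        simp at ht'len
        omega
      rw [ih (t.take (t.length - 3)).length (by simp; omega) (t.take (t.length - 3)) _ (m + 1) rfl (Or.inr hne)]
      rw [hch, join_append_singleton _ _ _ (pvChunks_ne_nil (t.take (t.length - 3)))]
      simp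

-- ===== VERDICT (by name: the statement is the Claim_ definition above) =====
theorem normalizar_rut_spec : Claim_equal_normalizar_rut := by
  intro rut _
  unfold Spec_normalizar_rut normalizar_rut normalizar_rut_alt
  cases rut with
  | none => rfl
  | some s =>
      simp only
      split
      · rfl
      · split
        · rfl
        · have := pvFmtA_eq_join
            (PySem.Chars.upper
              (s.toList.filter fun c =>
                PySem.Chars.isdigit c || PySem.Chars.upperChar c == 'K')).dropLast.length
            (PySem.Chars.upper
              (s.toList.filter fun c =>
                PySem.Chars.isdigit c || PySem.Chars.upperChar c == 'K')).dropLast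
            [] 0 rfl (Or.inl rfl)
          simp only [Nat.cast_zero, mul_zero] at this
          rw [this]; simp
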